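-- pv_equiv track=rewrite | github.com/FinnSutcliffe/IRprocessor | data_sanitation.py | identify_anomalies
-- ===== SOURCE A (Python) =====
-- def identify_anomalies(clean_wave, median_multiplier):
--     ##########################
--     #
--     # Identifies header, footer, midpoints etc and erroneous (NOT TOGGLEBIT)
--     #
--     # clean_wave          :      list of discreet feature durations as appearing in wave
--     # median_multiplier   :      multiplied by abs. median to calculate anom. duration threshold
--     #
--     ##########################
--
--     # 0: data
--     # 1: anomaly
--
--     anomalies = [0]*len(clean_wave)                     # List to contain enumeration of status of features
--
--     f_threshold = 1
--     freqs = [clean_wave.count(i) for i in clean_wave]   # Each feature replaced with its own frequency in clean_wave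
--     for i in range(len(freqs)):                         # Look through frequencies
--         if freqs[i] <= f_threshold:                     # f_threshold and below indicates anomaly
--             anomalies[i] = 1                            # mark that index as anomalous
--
--
-- #################################################################################
-- #    median = sorted([abs(i) for i in clean_wave])[int(len(clean_wave)/2)]      #
--  #   for i in range(len(clean_wave)): # NEEDS REWORKING                         #
--   #      if abs(clean_wave[i]) > median*median_multiplier: # NEEDS REWORKING    #
--    #         anomalies[i] = 1 # NEEDS REWORKING                                 #
-- #################################################################################
--
--     return anomalies
-- ===== SOURCE B (Python) =====
-- def identify_anomalies(clean_wave, median_multiplier):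
--     # Sort (value, original_index) pairs by value, then one sweep over the
--     # sorted order: a position whose value differs from both neighbours is a
--     # run of length 1, i.e. a unique value -> mark its original index.
--     n = len(clean_wave)
--     anomalies = [0] * n
--     pairs = sorted(((v, i) for i, v in enumerate(clean_wave)), key=lambda p: p[0])
--     for t in range(n):
--         if (t == 0 or pairs[t - 1][0] != pairs[t][0]) and \
--            (t == n - 1 or pairs[t + 1][0] != pairs[t][0]):
--             anomalies[pairs[t][1]] = 1
--     return anomalies
-- ===== Notes on version B (the rewrite author's own statement) =====
-- stated objective: faster
-- what changed: Replaces A's per-element clean_wave.count scans (quadratic) with sorting (value, index) pairs and one sweep over the sorted order that marks positions differing from both neighbours (singleton runs) at their original index.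
import Mathlib
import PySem

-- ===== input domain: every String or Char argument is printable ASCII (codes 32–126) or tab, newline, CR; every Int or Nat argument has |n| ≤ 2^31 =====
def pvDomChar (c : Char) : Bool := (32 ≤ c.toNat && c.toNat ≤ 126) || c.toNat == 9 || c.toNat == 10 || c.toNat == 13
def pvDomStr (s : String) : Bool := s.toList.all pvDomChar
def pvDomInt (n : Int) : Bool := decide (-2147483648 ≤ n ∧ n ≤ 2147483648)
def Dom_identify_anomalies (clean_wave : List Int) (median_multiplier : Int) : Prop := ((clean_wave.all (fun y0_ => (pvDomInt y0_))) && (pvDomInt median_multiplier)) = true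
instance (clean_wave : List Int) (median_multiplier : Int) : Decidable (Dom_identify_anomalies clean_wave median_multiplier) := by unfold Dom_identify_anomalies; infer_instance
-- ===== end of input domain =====

-- B replaces A's per-element count scans by sorting (value, index) pairs and one sweep
-- marking singleton runs (objective: faster).

-- ===== PORT A =====
-- Loop indices i run over range(len(freqs)), so 0 ≤ i < len: pyGetD freqs i 0 is exactly
-- freqs[i] and 'List.set i.toNat 1' is exactly 'anomalies[i] = 1' (in range, i.toNat = i).
def identify_anomalies (clean_wave : List Int) (median_multiplier : Int) : List Int :=
  let anomalies := List.replicate clean_wave.length (0 : Int)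
  let f_threshold : Int := 1
  let freqs := clean_wave.map (fun i => (clean_wave.count i : Int))
  (PySem.List.pyRange 0 (freqs.length : Int) 1).foldl
    (fun an i => if PySem.List.pyGetD freqs i 0 ≤ f_threshold then an.set i.toNat 1 else an)
    anomalies

-- ===== PORT B =====
-- pairs[t], pairs[t-1], pairs[t+1] are only reached by Python with the index in range
-- (short-circuit `or`); pyGetD with a dummy default makes the same accesses total and,
-- where Python reads them, in range, so pyGetD = the Python access there.
def identify_anomalies_alt (clean_wave : List Int) (median_multiplier : Int) : List Int :=
  let n : Int := (clean_wave.length : Int)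
  let anomalies := List.replicate clean_wave.length (0 : Int)
  let pairs := PySem.List.sorted ((PySem.List.enumerate clean_wave 0).map (fun p => (p.2, p.1))) (fun p => p.1) false
  (PySem.List.pyRange 0 n 1).foldl
    (fun an t =>
      if (t = 0 ∨ (PySem.List.pyGetD pairs (t - 1) ((0, 0) : Int × Int)).1 ≠ (PySem.List.pyGetD pairs t ((0, 0) : Int × Int)).1)
         ∧ (t = n - 1 ∨ (PySem.List.pyGetD pairs (t + 1) ((0, 0) : Int × Int)).1 ≠ (PySem.List.pyGetD pairs t ((0, 0) : Int × Int)).1)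
      then an.set (PySem.List.pyGetD pairs t ((0, 0) : Int × Int)).2.toNat 1 else an)
    anomalies

-- ===== PRECONDITION & SPEC =====
def Spec_identify_anomalies (clean_wave : List Int) (median_multiplier : Int) (out : List Int) : Prop := out = identify_anomalies_alt clean_wave median_multiplier
instance (clean_wave : List Int) (median_multiplier : Int) (out : List Int) : Decidable (Spec_identify_anomalies clean_wave median_multiplier out) := by unfold Spec_identify_anomalies; infer_instance

-- ===== CLAIM (what is proved, stated in full; the proofs are below) =====
def Claim_equal_identify_anomalies : Prop := ∀ (clean_wave : List Int) (median_multiplier : Int), Dom_identify_anomalies clean_wave median_multiplier → Spec_identify_anomalies clean_wave median_multiplier (identify_anomalies clean_wave median_multiplier)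

-- ===== LEMMAS AND PROOFS =====

-- Marking loops (all writes are the value 1): length preserved.
lemma pv_loop_length (cond : Nat → Prop) [DecidablePred cond] (pos : Nat → Nat) (k : Nat) (an : List Int) :
    ((List.range k).foldl (fun a t => if cond t then a.set (pos t) 1 else a) an).length = an.length := by
  induction k generalizing an with
  | zero => simp
  | succ k ih =>
      rw [List.range_succ, List.foldl_append]
      simp only [List.foldl_cons, List.foldl_nil]
      split_ifs
      · rw [List.length_set, ih]
      · exact ih an

-- Elementwise characterisation of a marking loop that writes 1 at position pos t when cond t.
lemma pv_loop_get (cond : Nat → Prop) [DecidablePred cond] (pos : Nat → Nat) (k : Nat) (an : List Int) (j : Nat) :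
    ((List.range k).foldl (fun a t => if cond t then a.set (pos t) 1 else a) an)[j]?
    = if (∃ t, t < k ∧ cond t ∧ pos t = j) ∧ j < an.length then some 1 else an[j]? := by
  induction k generalizing an with
  | zero => simp
  | succ k ih =>
      rw [List.range_succ, List.foldl_append]
      simp only [List.foldl_cons, List.foldl_nil]
      by_cases hc : cond k
      · rw [if_pos hc, List.getElem?_set, pv_loop_length, ih]
        by_cases hjk : pos k = j
        · subst hjk
          rw [if_pos rfl]
          by_cases hlen : pos k < an.length
          · rw [if_pos hlen, if_pos ⟨⟨k, by omega, hc, rfl⟩, hlen⟩]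
          · rw [if_neg hlen, if_neg (fun h => hlen h.2)]
            exact (List.getElem?_eq_none (by omega)).symm
        · rw [if_neg hjk]
          refine if_congr ?_ rfl rfl
          constructor
          · rintro ⟨⟨t, ht, hct, hpt⟩, r⟩; exact ⟨⟨t, by omega, hct, hpt⟩, r⟩
          · rintro ⟨⟨t, ht, hct, hpt⟩, r⟩
            refine ⟨⟨t, ?_, hct, hpt⟩, r⟩
            rcases Nat.lt_succ_iff_lt_or_eq.mp ht with h' | h'
            · exact h'
            · exact absurd hpt (h' ▸ hjk)
      · rw [if_neg hc, ih]
        refine if_congr ?_ rfl rfl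
        constructor
        · rintro ⟨⟨t, ht, hct, hpt⟩, r⟩; exact ⟨⟨t, by omega, hct, hpt⟩, r⟩
        · rintro ⟨⟨t, ht, hct, hpt⟩, r⟩
          refine ⟨⟨t, ?_, hct, hpt⟩, r⟩
          rcases Nat.lt_succ_iff_lt_or_eq.mp ht with h' | h'
          · exact h'
          · exact absurd hct (h' ▸ hc)

-- (map Prod.fst l).getD s 0 = (l.getD s (0,0)).1, unconditionally.
lemma pv_getD_map_fst (l : List (Int × Int)) (s : Nat) :
    (l.map Prod.fst).getD s 0 = (l.getD s ((0, 0) : Int × Int)).1 := by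
  rcases Nat.lt_or_ge s l.length with h | h
  · rw [List.getD_eq_getElem _ _ (by simpa using h), List.getD_eq_getElem _ _ h, List.getElem_map]
  · rw [List.getD_eq_default _ _ (by simpa using h), List.getD_eq_default _ _ h]

-- A position with a unique value characterises count = 1.
lemma pv_count_one_iff_unique (l : List Int) (t : Nat) (ht : t < l.length) :
    l.count (l.getD t 0) = 1 ↔ ∀ s, s < l.length → l.getD s 0 = l.getD t 0 → s = t := by
  rw [List.getD_eq_getElem l 0 ht]
  have h1 : 0 < l.count l[t] := List.count_pos_iff.mpr (List.getElem_mem ht)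
  constructor
  · intro hcount s hs hsv
    rw [List.getD_eq_getElem l 0 hs] at hsv
    by_contra hst
    have hdup : l.Duplicate l[t] := by
      rw [List.duplicate_iff_exists_distinct_get]
      rcases Nat.lt_or_ge s t with h | h
      · exact ⟨⟨s, hs⟩, ⟨t, ht⟩, h, by simp [hsv], by simp⟩
      · have h' : t < s := by omega
        exact ⟨⟨t, ht⟩, ⟨s, hs⟩, h', by simp, by simp [hsv]⟩
    have := List.duplicate_iff_two_le_count.mp hdup
    omega
  · intro huniq
    have h2 : ¬ 2 ≤ l.count l[t] := by
      intro h2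
      have hdup := List.duplicate_iff_two_le_count.mpr h2
      rw [List.duplicate_iff_exists_distinct_get] at hdup
      obtain ⟨a, b, hab, ha, hb⟩ := hdup
      simp only [List.get_eq_getElem] at ha hb
      have ea : (a : Nat) = t := huniq a a.isLt (by rw [List.getD_eq_getElem l 0 a.isLt]; exact ha.symm)
      have eb : (b : Nat) = t := huniq b b.isLt (by rw [List.getD_eq_getElem l 0 b.isLt]; exact hb.symm)
      have : (a : Nat) < (b : Nat) := hab
      omega
    omega

-- In a (getD-)monotone list, a position differing from both neighbours is the unique
-- position of its value.
lemma pv_iso_iff_unique (l : List Int)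
    (hm : ∀ s t : Nat, s ≤ t → t < l.length → l.getD s 0 ≤ l.getD t 0)
    (t : Nat) (ht : t < l.length) :
    ((t = 0 ∨ l.getD (t - 1) 0 ≠ l.getD t 0) ∧ (t = l.length - 1 ∨ l.getD (t + 1) 0 ≠ l.getD t 0))
    ↔ ∀ s, s < l.length → l.getD s 0 = l.getD t 0 → s = t := by
  constructor
  · rintro ⟨h1, h2⟩ s hs hsv
    by_contra hst
    rcases Nat.lt_or_ge s t with h | h
    · have hd1 : l.getD (t - 1) 0 ≠ l.getD t 0 := h1.resolve_left (by omega)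
      have hle1 : l.getD s 0 ≤ l.getD (t - 1) 0 := hm s (t - 1) (by omega) (by omega)
      have hle2 : l.getD (t - 1) 0 ≤ l.getD t 0 := hm (t - 1) t (by omega) ht
      rw [hsv] at hle1
      exact hd1 (le_antisymm hle2 hle1)
    · have h' : t < s := by omega
      have hd2 : l.getD (t + 1) 0 ≠ l.getD t 0 := h2.resolve_left (by omega)
      have hle1 : l.getD t 0 ≤ l.getD (t + 1) 0 := hm t (t + 1) (by omega) (by omega)
      have hle2 : l.getD (t + 1) 0 ≤ l.getD s 0 := hm (t + 1) s (by omega) hs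
      rw [hsv] at hle2
      exact hd2 (le_antisymm hle2 hle1)
  · intro hu
    constructor
    · by_cases h0 : t = 0
      · exact Or.inl h0
      · refine Or.inr (fun heq => ?_)
        have := hu (t - 1) (by omega) heq
        omega
    · by_cases hl : t = l.length - 1
      · exact Or.inl hl
      · refine Or.inr (fun heq => ?_)
        have := hu (t + 1) (by omega) heq
        omega

-- Bridge: A's per-index test 'count ≤ 1' holds at j iff B's sweep marks j, i.e. some
-- position t of the sorted pairs list carries original index j and differs from both
-- neighbours (a singleton run).
lemma pv_bridge (cw : List Int) (n : Nat) (hn : n = cw.length) (j : Nat) (hj : j < n)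
    (ps : List (Int × Int))
    (hpslen : ps.length = n)
    (hcnt : ∀ v : Int, (ps.map Prod.fst).count v = cw.count v)
    (hmem : ∀ p ∈ ps, ∃ k, ∃ h : k < n, p = ((cw[k]'(by omega), (k : Int)) : Int × Int))
    (hmemi : ∀ i (h : i < n), ((cw[i]'(by omega), (i : Int)) : Int × Int) ∈ ps)
    (hmono : ∀ s t : Nat, s ≤ t → t < (ps.map Prod.fst).length →
      (ps.map Prod.fst).getD s 0 ≤ (ps.map Prod.fst).getD t 0) :
    (cw.count (cw[j]'(by omega)) ≤ 1) ↔
      (∃ t, t < n ∧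
        ((((t : Int)) = 0 ∨ (PySem.List.pyGetD ps ((t : Int) - 1) ((0, 0) : Int × Int)).1 ≠ (PySem.List.pyGetD ps (t : Int) ((0, 0) : Int × Int)).1)
          ∧ (((t : Int)) = (n : Int) - 1 ∨ (PySem.List.pyGetD ps ((t : Int) + 1) ((0, 0) : Int × Int)).1 ≠ (PySem.List.pyGetD ps (t : Int) ((0, 0) : Int × Int)).1))
        ∧ (PySem.List.pyGetD ps (t : Int) ((0, 0) : Int × Int)).2.toNat = j) := by
  set fsts := ps.map Prod.fst with hfsts
  have hfl : fsts.length = n := by simp [hfsts, hpslen]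
  have h1 : 0 < cw.count (cw[j]'(by omega)) :=
    List.count_pos_iff.mpr (List.getElem_mem (by omega))
  have hcond : ∀ t, t < n →
      (((((t : Int)) = 0 ∨ (PySem.List.pyGetD ps ((t : Int) - 1) ((0, 0) : Int × Int)).1 ≠ (PySem.List.pyGetD ps (t : Int) ((0, 0) : Int × Int)).1)
        ∧ (((t : Int)) = (n : Int) - 1 ∨ (PySem.List.pyGetD ps ((t : Int) + 1) ((0, 0) : Int × Int)).1 ≠ (PySem.List.pyGetD ps (t : Int) ((0, 0) : Int × Int)).1))
      ↔ ((t = 0 ∨ fsts.getD (t - 1) 0 ≠ fsts.getD t 0) ∧ (t = fsts.length - 1 ∨ fsts.getD (t + 1) 0 ≠ fsts.getD t 0))) := by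
    intro t ht
    have e0 : PySem.List.pyGetD ps ((t : Int)) ((0, 0) : Int × Int) = ps.getD t ((0, 0) : Int × Int) :=
      PySem.List.pyGetD_natCast ps t _
    have e2 : PySem.List.pyGetD ps ((t : Int) + 1) ((0, 0) : Int × Int) = ps.getD (t + 1) ((0, 0) : Int × Int) := by
      rw [show ((t : Int) + 1) = ((t + 1 : Nat) : Int) by push_cast; ring, PySem.List.pyGetD_natCast]
    apply and_congr
    · by_cases ht0 : t = 0
      · subst ht0; simp
      · have e1 : PySem.List.pyGetD ps ((t : Int) - 1) ((0, 0) : Int × Int) = ps.getD (t - 1) ((0, 0) : Int × Int) := by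
          rw [show ((t : Int) - 1) = ((t - 1 : Nat) : Int) by omega, PySem.List.pyGetD_natCast]
        rw [e0, e1]
        constructor
        · rintro (h | h)
          · exact absurd (by exact_mod_cast h) ht0
          · exact Or.inr (by rw [pv_getD_map_fst, pv_getD_map_fst]; exact h)
        · rintro (h | h)
          · exact absurd h ht0
          · exact Or.inr (by rw [pv_getD_map_fst, pv_getD_map_fst] at h; exact h)
    · rw [e0, e2]
      constructor
      · rintro (h | h)
        · exact Or.inl (by rw [hfl]; omega)
        · exact Or.inr (by rw [pv_getD_map_fst, pv_getD_map_fst]; exact h)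
      · rintro (h | h)
        · exact Or.inl (by rw [hfl] at h; omega)
        · exact Or.inr (by rw [pv_getD_map_fst, pv_getD_map_fst] at h; exact h)
  constructor
  · intro hle
    have hc1 : cw.count (cw[j]'(by omega)) = 1 := by omega
    obtain ⟨t, ht, hpt⟩ := List.mem_iff_getElem.mp (hmemi j hj)
    have htn : t < n := by omega
    refine ⟨t, htn, ?_, ?_⟩
    · rw [hcond t htn, pv_iso_iff_unique fsts hmono t (by omega)]
      apply (pv_count_one_iff_unique fsts t (by omega)).mp
      have hft : fsts.getD t 0 = cw[j]'(by omega) := by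
        rw [List.getD_eq_getElem _ _ (by omega)]
        simp only [hfsts, List.getElem_map, hpt]
      rw [hft, hcnt, hc1]
    · rw [PySem.List.pyGetD_natCast, List.getD_eq_getElem _ _ ht, hpt]
      simp
  · rintro ⟨t, ht, hcb, hpos⟩
    have ht' : t < ps.length := by omega
    obtain ⟨k, hk, hptk⟩ := hmem (ps[t]'ht') (List.getElem_mem ht')
    rw [PySem.List.pyGetD_natCast, List.getD_eq_getElem _ _ ht', hptk] at hpos
    simp only [Int.toNat_natCast] at hpos
    subst hpos
    have hiso := (hcond t ht).mp hcb
    have huniq := (pv_iso_iff_unique fsts hmono t (by omega)).mp hiso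
    have hcount := (pv_count_one_iff_unique fsts t (by omega)).mpr huniq
    have hft : fsts.getD t 0 = cw[k]'(by omega) := by
      rw [List.getD_eq_getElem _ _ (by omega)]
      simp only [hfsts, List.getElem_map, hptk]
    rw [hft, hcnt] at hcount
    omega

-- ===== VERDICT (by name: the statement is the Claim_ definition above) =====
theorem identify_anomalies_spec : Claim_equal_identify_anomalies := by
  intro cw mm _
  unfold Spec_identify_anomalies identify_anomalies identify_anomalies_alt
  simp only []
  set n := cw.length with hn
  set freqs := cw.map (fun i => (cw.count i : Int)) with hfreqs
  have hflen : freqs.length = n := by simp [hfreqs, hn]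
  set E := (PySem.List.enumerate cw 0).map (fun p => (p.2, p.1)) with hE
  set ps := PySem.List.sorted E (fun p => p.1) false with hps
  have hElen : E.length = n := by simp [hE, hn]
  have hperm : ps.Perm E := PySem.List.sorted_perm E (fun p => p.1) false
  have hpslen : ps.length = n := by rw [hps, PySem.List.length_sorted, hElen]
  have hcnt : ∀ v : Int, (ps.map Prod.fst).count v = cw.count v := by
    intro v
    have h1 : (ps.map Prod.fst).Perm (E.map Prod.fst) := hperm.map _
    have h2 : E.map Prod.fst = cw := by
      rw [hE, List.map_map]
      exact PySem.List.map_snd_enumerate cw 0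
    rw [h1.count_eq, h2]
  have hmem : ∀ p ∈ ps, ∃ k, ∃ h : k < n, p = ((cw[k]'(by omega), (k : Int)) : Int × Int) := by
    intro p hp
    have hpE : p ∈ E := hperm.mem_iff.mp hp
    rw [hE, List.mem_map] at hpE
    obtain ⟨q, hq, rfl⟩ := hpE
    rw [PySem.List.mem_enumerate_iff] at hq
    obtain ⟨k, hk, rfl⟩ := hq
    exact ⟨k, hk, by simp⟩
  have hmemi : ∀ i (h : i < n), ((cw[i]'(by omega), (i : Int)) : Int × Int) ∈ ps := by
    intro i h
    apply hperm.mem_iff.mpr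
    rw [hE, List.mem_map]
    exact ⟨((i : Int), cw[i]'h), (PySem.List.mem_enumerate_iff cw 0 _).mpr ⟨i, h, by simp⟩, rfl⟩
  have hmono : ∀ s t : Nat, s ≤ t → t < (ps.map Prod.fst).length →
      (ps.map Prod.fst).getD s 0 ≤ (ps.map Prod.fst).getD t 0 := by
    intro s t hst htl
    have htl' : t < ps.length := by simpa using htl
    rw [List.getD_eq_getElem _ _ (by simpa using lt_of_le_of_lt hst htl'),
        List.getD_eq_getElem _ _ htl]
    simp only [List.getElem_map]
    exact PySem.List.key_sorted_getElem_mono E (fun p => p.1) hst (by rw [← hps]; exact htl')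
  rw [hflen]
  simp only [PySem.List.pyRange_zero_natCast, List.foldl_map, Int.toNat_natCast,
    PySem.List.pyGetD_natCast freqs]
  apply List.ext_getElem?
  intro j
  rw [pv_loop_get (fun t : Nat => freqs.getD t 0 ≤ 1) (fun t => t) n _ j,
      pv_loop_get _ (fun t : Nat => (PySem.List.pyGetD ps (t : Int) ((0, 0) : Int × Int)).2.toNat) n _ j]
  simp only [List.length_replicate]
  refine if_congr ?_ rfl rfl
  by_cases hj : j < n
  · have hfj : freqs.getD j 0 = (cw.count (cw[j]'hj) : Int) := by
      rw [hfreqs, List.getD_eq_getElem _ _ (by simpa using hj), List.getElem_map]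
    have hbr := pv_bridge cw n hn j hj ps hpslen hcnt hmem hmemi hmono
    constructor
    · rintro ⟨⟨t, ht, hct, rfl⟩, hlen⟩
      refine ⟨hbr.mp ?_, hlen⟩
      rw [hfj] at hct
      exact_mod_cast hct
    · rintro ⟨hex, hlen⟩
      refine ⟨⟨j, hj, ?_, rfl⟩, hlen⟩
      rw [hfj]
      exact_mod_cast hbr.mpr hex
  · constructor
    · rintro ⟨_, hlen⟩; omega
    · rintro ⟨_, hlen⟩; omega
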